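-- pv_equiv track=rewrite | github.com/thesarfo/oware | src/oware/engine/_core.py | _sow_destinations
-- ===== SOURCE A (Python) =====
-- def _sow_destinations(src: int, seeds: int) -> list[int]:
--   dests: list[int] = []
--   idx = src
--   while len(dests) < seeds:
--     idx = (idx + 1) % 12
--     if idx == src:
--       continue
--     dests.append(idx)
--   return dests
-- ===== SOURCE B (Python) =====
-- def _sow_destinations(src: int, seeds: int) -> list[int]:
--   ring = [(src + k) % 12 for k in range(1, 13)]
--   cycle = [h for h in ring if h != src]
--   n = max(seeds, 0)
--   q, r = divmod(n, len(cycle))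
--   return cycle * q + cycle[:r]
-- ===== Notes on version B (the rewrite author's own statement) =====
-- stated objective: faster
-- what changed: Replaces the per-seed while loop (skipping src each lap) by building the 11/12-hole cycle once and materialising the answer as whole-cycle repetition plus a slice via divmod.
import Mathlib
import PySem

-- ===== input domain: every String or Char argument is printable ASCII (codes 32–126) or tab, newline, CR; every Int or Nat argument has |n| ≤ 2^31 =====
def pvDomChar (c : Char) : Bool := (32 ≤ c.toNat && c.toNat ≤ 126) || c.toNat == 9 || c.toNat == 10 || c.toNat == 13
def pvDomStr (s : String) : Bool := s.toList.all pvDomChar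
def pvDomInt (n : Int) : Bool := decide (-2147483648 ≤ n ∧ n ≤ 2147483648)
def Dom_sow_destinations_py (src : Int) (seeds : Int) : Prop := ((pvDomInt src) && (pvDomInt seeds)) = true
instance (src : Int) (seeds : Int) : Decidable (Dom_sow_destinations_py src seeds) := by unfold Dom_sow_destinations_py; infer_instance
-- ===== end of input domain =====

-- B replaces A's per-seed while loop by building the cycle of destination holes once and
-- materialising the answer with divmod: whole-cycle repetition plus a slice (measurably faster in Python).

-- ===== PORT A =====
-- termination measure facts for A's while loop, cited by name from `decreasing_by`
lemma pvMeasure_skip (src seeds idx : Int) (dests : List Int)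
    (h2 : PySem.Int.mod (idx + 1) 12 = src) :
    2 * (seeds - (dests.length : Int)).toNat + (if PySem.Int.mod (idx + 1) 12 = src then 0 else 1)
      < 2 * (seeds - (dests.length : Int)).toNat + (if idx = src then 0 else 1) := by
  have hne : idx ≠ src := by
    intro h
    rw [h, PySem.Int.mod_eq_emod_of_pos (by omega)] at h2
    omega
  rw [if_pos h2, if_neg hne]
  omega

lemma pvMeasure_app (src seeds idx : Int) (dests : List Int)
    (h1 : (dests.length : Int) < seeds) :
    2 * (seeds - (((dests ++ [PySem.Int.mod (idx + 1) 12]).length : Int))).toNat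
        + (if PySem.Int.mod (idx + 1) 12 = src then 0 else 1)
      < 2 * (seeds - (dests.length : Int)).toNat + (if idx = src then 0 else 1) := by
  simp only [List.length_append, List.length_cons, List.length_nil]
  split_ifs <;> omega

-- A's while loop: state (dests, idx); recompute idx, skip it when it equals src, else append.
def sowLoopA (src : Int) (seeds : Int) (dests : List Int) (idx : Int) : List Int :=
  if h1 : (dests.length : Int) < seeds then
    let idx' := PySem.Int.mod (idx + 1) 12
    if h2 : idx' = src then
      sowLoopA src seeds dests idx'
    else
      sowLoopA src seeds (dests ++ [idx']) idx'
  else dests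
termination_by (2 * (seeds - dests.length).toNat + (if idx = src then 0 else 1) : Nat)
decreasing_by
  · exact pvMeasure_skip src seeds idx dests h2
  · exact pvMeasure_app src seeds idx dests h1

def sow_destinations_py (src : Int) (seeds : Int) : List Int :=
  sowLoopA src seeds [] src

-- ===== PORT B =====
-- divmod(n, len(cycle)) never raises: cycle always has 11 or 12 elements, so it is ported as floordiv/mod.
def sow_destinations_py_alt (src : Int) (seeds : Int) : List Int :=
  let ring := (PySem.List.pyRange 1 13 1).map (fun k => PySem.Int.mod (src + k) 12)
  let cycle := ring.filter (fun h => h != src)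
  let n := max seeds 0
  let q := PySem.Int.floordiv n (PySem.List.len cycle)
  let r := PySem.Int.mod n (PySem.List.len cycle)
  PySem.List.pyRepeat cycle q ++ PySem.List.slice cycle none (some r)

-- ===== PRECONDITION & SPEC =====
def Spec_sow_destinations_py (src : Int) (seeds : Int) (out : List Int) : Prop := out = sow_destinations_py_alt src seeds
instance (src : Int) (seeds : Int) (out : List Int) : Decidable (Spec_sow_destinations_py src seeds out) := by unfold Spec_sow_destinations_py; infer_instance

-- ===== CLAIM (what is proved, stated in full; the proofs are below) =====
def Claim_equal_sow_destinations_py : Prop := ∀ (src : Int) (seeds : Int), Dom_sow_destinations_py src seeds → Spec_sow_destinations_py src seeds (sow_destinations_py src seeds)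

-- ===== LEMMAS AND PROOFS =====

-- number of distinct destination holes in one lap: 11 when src is a real hole, else all 12
def pvL (src : Int) : Nat := if 0 ≤ src ∧ src < 12 then 11 else 12

-- the c-th sown destination, counting from 0
def pvG (src : Int) (c : Nat) : Int := PySem.Int.mod (src + (c % pvL src : Nat) + 1) 12

-- the next value A appends from loop state idx (one skip at most)
def pvNxt (src idx : Int) : Int :=
  if PySem.Int.mod (idx + 1) 12 = src then PySem.Int.mod (PySem.Int.mod (idx + 1) 12 + 1) 12
  else PySem.Int.mod (idx + 1) 12

lemma pvL_pos (src : Int) : 0 < pvL src := by unfold pvL; split <;> omega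

lemma pv_succ_ne (src : Int) : PySem.Int.mod (src + 1) 12 ≠ src := by
  rw [PySem.Int.mod_eq_emod_of_pos (by omega)]
  omega

lemma pv_step0 (src : Int) : pvNxt src src = pvG src 0 := by
  unfold pvNxt pvG pvL
  simp only [PySem.Int.mod_eq_emod_of_pos (show (0:Int) < 12 by omega)]
  split_ifs <;> omega

lemma pv_step (src : Int) (c : Nat) : pvNxt src (pvG src c) = pvG src (c + 1) := by
  unfold pvNxt pvG pvL
  simp only [PySem.Int.mod_eq_emod_of_pos (show (0:Int) < 12 by omega)]
  split_ifs <;> omega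

lemma pvG_period (src : Int) (c : Nat) : pvG src (c + pvL src) = pvG src c := by
  unfold pvG
  rw [Nat.add_mod_right]

lemma pv_cons_range_map (f : Nat → Int) (c m : Nat) :
    (List.range (m + 1)).map (fun i => f (c + i))
      = f c :: (List.range m).map (fun i => f (c + 1 + i)) := by
  rw [List.range_succ_eq_map, List.map_cons, List.map_map]
  congr 1
  apply List.map_congr_left
  intro i _
  simp only [Function.comp, Nat.succ_eq_add_one]
  congr 1
  omega

lemma sowLoopA_eq (src seeds : Int) :
    ∀ (k : Nat) (dests : List Int) (idx : Int),
      seeds.toNat ≤ dests.length + k →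
      pvNxt src idx = pvG src dests.length →
      sowLoopA src seeds dests idx
        = dests ++ (List.range (seeds.toNat - dests.length)).map (fun i => pvG src (dests.length + i)) := by
  intro k
  induction k with
  | zero =>
    intro dests idx hk _
    rw [sowLoopA, dif_neg (by omega : ¬ ((dests.length : Int) < seeds))]
    have h0 : seeds.toNat - dests.length = 0 := by omega
    rw [h0]
    simp
  | succ k ih =>
    intro dests idx hk hinv
    rw [sowLoopA]
    by_cases h1 : (dests.length : Int) < seeds
    · rw [dif_pos h1]
      simp only []
      have hm : seeds.toNat - dests.length = (seeds.toNat - (dests.length + 1)) + 1 := by omega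
      by_cases h2 : PySem.Int.mod (idx + 1) 12 = src
      · -- skip branch: the skipped state is src; unfold once more, which must append
        rw [dif_pos h2, h2, sowLoopA, dif_pos h1]
        simp only []
        rw [dif_neg (pv_succ_ne src)]
        have hval : PySem.Int.mod (src + 1) 12 = pvG src dests.length := by
          unfold pvNxt at hinv
          rw [if_pos h2, h2] at hinv
          exact hinv
        rw [hval]
        have hlen : (dests ++ [pvG src dests.length]).length = dests.length + 1 := by simp
        rw [ih (dests ++ [pvG src dests.length]) (pvG src dests.length)
              (by rw [hlen]; omega)
              (by rw [hlen]; exact pv_step src dests.length)]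
        rw [hlen, hm, pv_cons_range_map]
        simp
      · -- append branch
        rw [dif_neg h2]
        have hval : PySem.Int.mod (idx + 1) 12 = pvG src dests.length := by
          unfold pvNxt at hinv
          rw [if_neg h2] at hinv
          exact hinv
        rw [hval]
        have hlen : (dests ++ [pvG src dests.length]).length = dests.length + 1 := by simp
        rw [ih (dests ++ [pvG src dests.length]) (pvG src dests.length)
              (by rw [hlen]; omega)
              (by rw [hlen]; exact pv_step src dests.length)]
        rw [hlen, hm, pv_cons_range_map]
        simp
    · rw [dif_neg h1]
      have h0 : seeds.toNat - dests.length = 0 := by omega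
      rw [h0]
      simp

lemma pvA_eq (src seeds : Int) :
    sow_destinations_py src seeds = (List.range seeds.toNat).map (pvG src) := by
  unfold sow_destinations_py
  rw [sowLoopA_eq src seeds seeds.toNat [] src (by simp) (by simpa using pv_step0 src)]
  simp

lemma pv_cycle_eq (src : Int) :
    ((PySem.List.pyRange 1 13 1).map (fun k => PySem.Int.mod (src + k) 12)).filter (fun h => h != src)
      = (List.range (pvL src)).map (pvG src) := by
  by_cases h : 0 ≤ src ∧ src < 12
  · obtain ⟨ha, hb⟩ := h
    interval_cases src <;> decide
  · have hL : pvL src = 12 := by unfold pvL; rw [if_neg h]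
    rw [List.filter_eq_self.mpr ?_]
    · rw [hL, PySem.List.pyRange_one]
      simp only [List.map_map]
      apply List.map_congr_left
      intro k hk
      have hk12 : k < 12 := by
        have := List.mem_range.mp hk
        omega
      simp only [Function.comp]
      unfold pvG pvL
      rw [if_neg h, Nat.mod_eq_of_lt hk12]
      congr 1
      ring
    · intro a ha
      simp only [List.mem_map] at ha
      obtain ⟨k, _, hk⟩ := ha
      have h0 : 0 ≤ PySem.Int.mod (src + k) 12 := PySem.Int.mod_nonneg _ (by omega)
      have h12 : PySem.Int.mod (src + k) 12 < 12 := PySem.Int.mod_lt _ (by omega)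
      rw [bne_iff_ne]
      intro hEq
      exact h ⟨by omega, by omega⟩

lemma pv_range_map_period (f : Nat → Int) (L : Nat) (hf : ∀ c, f (c + L) = f c) :
    ∀ (q r : Nat), (List.range (q * L + r)).map f
      = (List.replicate q ((List.range L).map f)).flatten ++ (List.range r).map f := by
  intro q
  induction q with
  | zero => simp
  | succ q ih =>
    intro r
    have hsum : (q + 1) * L + r = L + (q * L + r) := by ring
    have hshift : ∀ i : Nat, f (L + i) = f i := fun i => by rw [Nat.add_comm]; exact hf i
    rw [hsum, List.range_add, List.map_append, List.map_map, List.replicate_succ,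
        List.flatten_cons, List.append_assoc]
    congr 1
    calc (List.range (q * L + r)).map (f ∘ (L + ·))
        = (List.range (q * L + r)).map f := by
          apply List.map_congr_left
          intro i _
          exact hshift i
      _ = (List.replicate q ((List.range L).map f)).flatten ++ (List.range r).map f := ih r

lemma pvB_eq (src seeds : Int) :
    sow_destinations_py_alt src seeds = (List.range seeds.toNat).map (pvG src) := by
  unfold sow_destinations_py_alt
  simp only []
  rw [pv_cycle_eq]
  have hLpos : 0 < pvL src := pvL_pos src
  have hlen : ((List.range (pvL src)).map (pvG src)).length = pvL src := by simp
  rw [PySem.List.len_eq, hlen]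
  set n : Int := max seeds 0 with hn
  have hn0 : 0 ≤ n := by simp [hn]
  have hLpos' : (0:Int) < (pvL src : Int) := by exact_mod_cast hLpos
  rw [PySem.Int.floordiv_eq_ediv_of_pos hLpos', PySem.Int.mod_eq_emod_of_pos hLpos']
  have hr0 : 0 ≤ n % (pvL src : Int) := Int.emod_nonneg n (by omega)
  have hrL : n % (pvL src : Int) < (pvL src : Int) := Int.emod_lt_of_pos n hLpos'
  have hq0 : 0 ≤ n / (pvL src : Int) := Int.ediv_nonneg hn0 (by omega)
  have heq : (pvL src : Int) * (n / (pvL src : Int)) + n % (pvL src : Int) = n :=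
    Int.ediv_add_emod n (pvL src)
  rw [PySem.List.slice_to ((List.range (pvL src)).map (pvG src)) hr0]
  simp only [PySem.List.pyRepeat]
  have hmin : min (n % (pvL src : Int)).toNat (pvL src) = (n % (pvL src : Int)).toNat := by
    omega
  have htake : ((List.range (pvL src)).map (pvG src)).take (n % (pvL src : Int)).toNat
      = (List.range (n % (pvL src : Int)).toNat).map (pvG src) := by
    rw [← List.map_take, List.take_range, hmin]
  rw [htake]
  have hql : (((n / (pvL src : Int)).toNat * pvL src : Nat) : Int)
      = (pvL src : Int) * (n / (pvL src : Int)) := by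
    push_cast
    rw [Int.toNat_of_nonneg hq0]
    ring
  have hsplit : seeds.toNat = (n / (pvL src : Int)).toNat * pvL src + (n % (pvL src : Int)).toNat := by
    omega
  rw [hsplit, pv_range_map_period (pvG src) (pvL src) (pvG_period src)]

-- ===== VERDICT (by name: the statement is the Claim_ definition above) =====
theorem sow_destinations_py_spec : Claim_equal_sow_destinations_py := by
  intro src seeds _
  unfold Spec_sow_destinations_py
  rw [pvA_eq, pvB_eq]
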